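-- pv_equiv track=rewrite | github.com/SiniCode/advent-of-code-2023 | Day1/part2.py | get_last_number_in_line
-- ===== SOURCE A (Python) =====
-- def get_last_number_in_line(numbers, line):
--
--     i = len(line)
--     while i > 0:
--         section = line[:i]
--         for num in numbers.keys():
--             if section.endswith(num):
--                 return numbers[num]
--         i -= 1
--
--     return ''
-- ===== SOURCE B (Python) =====
-- def get_last_number_in_line(numbers, line):
--     best_key = None
--     best_end = -1
--     for num in numbers:
--         p = line.rfind(num)
--         if p != -1:
--             end = p + len(num)
--             if end > best_end:
--                 best_end = end
--                 best_key = num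
--     if best_key is None:
--         return ''
--     return numbers[best_key]
-- ===== Notes on version B (the rewrite author's own statement) =====
-- stated objective: alternative
-- what changed: Replaces A's nested scan over shrinking prefixes (each prefix tested against every key with endswith) by a single rfind per key, keeping the key whose rightmost occurrence ends furthest right; the strict-greater update preserves A's dict-order tiebreak.
-- outside the precondition, e.g. on get_last_number_in_line({'': 'x'}, ''): A returns '', B returns 'x'
import Mathlib
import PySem

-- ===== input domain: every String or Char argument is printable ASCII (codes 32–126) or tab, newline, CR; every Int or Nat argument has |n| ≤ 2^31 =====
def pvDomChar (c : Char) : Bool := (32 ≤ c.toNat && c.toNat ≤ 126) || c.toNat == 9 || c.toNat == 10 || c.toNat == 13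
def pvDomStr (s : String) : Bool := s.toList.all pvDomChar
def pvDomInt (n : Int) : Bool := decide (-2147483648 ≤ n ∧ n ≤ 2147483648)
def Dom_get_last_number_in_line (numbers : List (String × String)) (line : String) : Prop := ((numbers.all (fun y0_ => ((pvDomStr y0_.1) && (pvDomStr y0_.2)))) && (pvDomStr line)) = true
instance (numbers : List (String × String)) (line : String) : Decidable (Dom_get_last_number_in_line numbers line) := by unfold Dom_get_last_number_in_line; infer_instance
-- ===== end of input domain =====

-- B replaces A's shrinking-prefix rescan by one rfind per key, keeping the key with the
-- greatest occurrence end (strict improvement, so the first key in dict order wins ties).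

-- ===== PORT A =====
-- while i > 0: section = line[:i]; for num in numbers.keys(): if section.endswith(num): return numbers[num]; i -= 1
def pvALoop (numbers : List (String × String)) (L : List Char) : Nat → String
  | 0 => ""
  | i + 1 =>
    let sec := PySem.Chars.slice L none (some ((i + 1 : Nat) : Int))
    match (PySem.Dict.keys (PySem.Dict.mk numbers)).find?
        (fun num => PySem.Chars.endswith sec num.toList) with
    | some num => PySem.Dict.getD (PySem.Dict.mk numbers) num ""
    | none => pvALoop numbers L i

def get_last_number_in_line (numbers : List (String × String)) (line : String) : String :=
  pvALoop numbers line.toList line.toList.length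

-- ===== PORT B =====
-- body of B's for-loop: p = line.rfind(num); if p != -1: end = p + len(num); if end > best_end: update
def pvBStep (L : List Char) (st : Option String × Int) (num : String) : Option String × Int :=
  let p := PySem.Chars.rfind L num.toList
  if p ≠ -1 then
    let e := p + (num.toList.length : Int)
    if st.2 < e then (some num, e) else st
  else st

def get_last_number_in_line_alt (numbers : List (String × String)) (line : String) : String :=
  let r := (PySem.Dict.keys (PySem.Dict.mk numbers)).foldl (pvBStep line.toList) (none, -1)
  match r.1 with
  | some num => PySem.Dict.getD (PySem.Dict.mk numbers) num ""
  | none => ""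

-- ===== PRECONDITION & SPEC =====
-- Pre_ excludes only the degenerate corner "line is empty and the dict maps key '' to a
-- non-empty value": there A's prefix loop never runs and returns '' while B sees
-- ''.rfind('') == 0 and returns the empty key's value — both answers are defensible on
-- that unspecifiable corner.
def Pre_get_last_number_in_line (numbers : List (String × String)) (line : String) : Prop :=
  line = "" → ∀ pr, numbers.find? (fun p => p.1 == "") = some pr → pr.2 = ""
instance (numbers : List (String × String)) (line : String) : Decidable (Pre_get_last_number_in_line numbers line) := by unfold Pre_get_last_number_in_line; infer_instance

def pvWitness_get_last_number_in_line : (List (String × String)) × String :=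
  ([("one", "1"), ("two", "2"), ("1", "1")], "zone1two")

def Spec_get_last_number_in_line (numbers : List (String × String)) (line : String) (out : String) : Prop := out = get_last_number_in_line_alt numbers line
instance (numbers : List (String × String)) (line : String) (out : String) : Decidable (Spec_get_last_number_in_line numbers line out) := by unfold Spec_get_last_number_in_line; infer_instance

-- ===== CLAIM (what is proved, stated in full; the proofs are below) =====
def Claim_equal_get_last_number_in_line : Prop := ∀ (numbers : List (String × String)) (line : String), Dom_get_last_number_in_line numbers line → Pre_get_last_number_in_line numbers line → Spec_get_last_number_in_line numbers line (get_last_number_in_line numbers line)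

-- ===== LEMMAS AND PROOFS =====

-- `num` occurs in L ending exactly at position e
def pvMatches (L : List Char) (num : String) (e : Nat) : Prop :=
  ∃ p : Nat, p + num.toList.length = e ∧ num.toList <+: L.drop p

-- the end position B derives for a key: rfind + len, or -1 if absent
def pvG (L : List Char) (num : String) : Int :=
  if PySem.Chars.rfind L num.toList = -1 then -1
  else PySem.Chars.rfind L num.toList + (num.toList.length : Int)

lemma pv_go_spec (L sub : List Char) (i : Nat) :
    (PySem.Chars.rfind.go L sub i = -1 ∧ ∀ j ≤ i, ¬ sub <+: L.drop j) ∨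
    (∃ p : Nat, PySem.Chars.rfind.go L sub i = (p : Int) ∧ p ≤ i ∧ sub <+: L.drop p ∧
      ∀ j ≤ i, p < j → ¬ sub <+: L.drop j) := by
  induction i with
  | zero =>
    by_cases h : sub <+: L
    · exact Or.inr ⟨0, by simp [PySem.Chars.rfind.go, List.isPrefixOf_iff_prefix, h],
        Nat.le_refl 0, by simpa using h, fun j hj hlt => by omega⟩
    · refine Or.inl ⟨by simp [PySem.Chars.rfind.go, List.isPrefixOf_iff_prefix, h], ?_⟩
      intro j hj
      have : j = 0 := Nat.le_zero.mp hj
      subst this; simpa using h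
  | succ i ih =>
    by_cases h : sub <+: L.drop (i + 1)
    · refine Or.inr ⟨i + 1, ?_, Nat.le_refl _, h, fun j hj hlt => by omega⟩
      simp [PySem.Chars.rfind.go, List.isPrefixOf_iff_prefix, h]
    · have hg : PySem.Chars.rfind.go L sub (i + 1) = PySem.Chars.rfind.go L sub i := by
        simp [PySem.Chars.rfind.go, List.isPrefixOf_iff_prefix, h]
      rcases ih with ⟨h1, h2⟩ | ⟨p, h1, h2, h3, h4⟩
      · refine Or.inl ⟨hg ▸ h1, ?_⟩
        intro j hj
        by_cases hje : j = i + 1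
        · subst hje; exact h
        · exact h2 j (by omega)
      · refine Or.inr ⟨p, hg ▸ h1, Nat.le_succ_of_le h2, h3, ?_⟩
        intro j hj hlt
        by_cases hje : j = i + 1
        · subst hje; exact h
        · exact h4 j (by omega) hlt

lemma pv_rfind_neg {L sub : List Char} (h : PySem.Chars.rfind L sub = -1) (j : Nat) :
    ¬ sub <+: L.drop j := by
  have hs := pv_go_spec L sub L.length
  rcases hs with ⟨h1, h2⟩ | ⟨p, h1, _, _, _⟩
  · by_cases hj : j ≤ L.length
    · exact h2 j hj
    · have hnil : L.drop j = [] := List.drop_eq_nil_of_le (by omega)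
      have hlen : ¬ sub <+: L.drop L.length := h2 L.length (Nat.le_refl _)
      rw [List.drop_length] at hlen
      rw [hnil]; exact hlen
  · rw [PySem.Chars.rfind] at h; rw [h] at h1; omega

lemma pv_rfind_pos {L sub : List Char} (h : PySem.Chars.rfind L sub ≠ -1) :
    ∃ p : Nat, PySem.Chars.rfind L sub = (p : Int) ∧ p ≤ L.length ∧ sub <+: L.drop p ∧
      ∀ j ≤ L.length, p < j → ¬ sub <+: L.drop j := by
  have hs := pv_go_spec L sub L.length
  rcases hs with ⟨h1, _⟩ | ⟨p, h1, h2, h3, h4⟩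
  · exact absurd h1 (by rw [PySem.Chars.rfind] at h; exact h)
  · exact ⟨p, h1, h2, h3, h4⟩

lemma pv_rfind_nil (L : List Char) : PySem.Chars.rfind L [] = (L.length : Int) := by
  rw [PySem.Chars.rfind]
  cases L.length <;> simp [PySem.Chars.rfind.go]

lemma pv_endswith_take (L k : List Char) (e : Nat) (he : e ≤ L.length) :
    PySem.Chars.endswith (L.take e) k = true ↔ ∃ p : Nat, p + k.length = e ∧ k <+: L.drop p := by
  rw [PySem.Chars.endswith_iff]
  constructor
  · rintro ⟨t, ht⟩
    refine ⟨t.length, ?_, ?_⟩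
    · have hl := congrArg List.length ht
      simp [Nat.min_eq_left he] at hl
      omega
    · have hL : L = t ++ (k ++ L.drop e) := by
        conv_lhs => rw [← List.take_append_drop e L]
        rw [← ht, List.append_assoc]
      have hd : L.drop t.length = k ++ L.drop e := by
        conv_lhs => rw [hL]
        rw [List.drop_left]
      rw [hd]; exact List.prefix_append _ _
  · rintro ⟨p, hpe, r, hr⟩
    refine ⟨L.take p, ?_⟩
    have ht : L.take e = L.take p ++ k := by
      rw [← hpe, List.take_add]
      congr 1
      rw [← hr, List.take_left]
    rw [ht]

lemma pvG_ge_of_matches {L : List Char} {num : String} {e : Nat} (he : e ≤ L.length)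
    (hm : pvMatches L num e) : (e : Int) ≤ pvG L num := by
  obtain ⟨p, hpe, hpre⟩ := hm
  have hne : PySem.Chars.rfind L num.toList ≠ -1 := fun h => pv_rfind_neg h p hpre
  obtain ⟨q, hq, hqlen, _, hqmax⟩ := pv_rfind_pos hne
  have hplen : p ≤ L.length := by omega
  have hpq : p ≤ q := by
    by_contra hc
    exact hqmax p hplen (by omega) hpre
  rw [pvG, if_neg hne, hq]
  omega

lemma pvG_matches {L : List Char} {num : String}
    (hne : PySem.Chars.rfind L num.toList ≠ -1) :
    ∃ e : Nat, (e : Int) = pvG L num ∧ e ≤ L.length ∧ pvMatches L num e := by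
  obtain ⟨q, hq, hqlen, hqpre, _⟩ := pv_rfind_pos hne
  refine ⟨q + num.toList.length, ?_, ?_, q, rfl, hqpre⟩
  · rw [pvG, if_neg hne, hq]; push_cast; ring
  · have hlp := hqpre.length_le
    rw [List.length_drop] at hlp
    omega

lemma pvG_one_le {L : List Char} {num : String} (hd : L ≠ [] ∨ num.toList ≠ [])
    (hne : PySem.Chars.rfind L num.toList ≠ -1) : 1 ≤ pvG L num := by
  rw [pvG, if_neg hne]
  by_cases hnum : num.toList = []
  · have hL : L ≠ [] := by
      rcases hd with h | h
      · exact h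
      · exact absurd hnum h
    rw [hnum, pv_rfind_nil]
    have : 1 ≤ L.length := by
      cases L with
      | nil => exact absurd rfl hL
      | cons a t => simp
    simp; omega
  · obtain ⟨q, hq, _, _, _⟩ := pv_rfind_pos hne
    have : 1 ≤ num.toList.length := by
      cases hx : num.toList with
      | nil => exact absurd hx hnum
      | cons a t => simp
    rw [hq]; omega

lemma pv_step_eq (L : List Char) (st : Option String × Int) (num : String)
    (hst : -1 ≤ st.2) :
    pvBStep L st num = if st.2 < pvG L num then (some num, pvG L num) else st := by
  by_cases h : PySem.Chars.rfind L num.toList = -1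
  · have hnlt : ¬ st.2 < (-1 : Int) := by omega
    simp [pvBStep, pvG, h, hnlt]
  · simp [pvBStep, pvG, h]

lemma pv_fold_spec (L : List Char) (ks : List String) : ∀ st : Option String × Int, -1 ≤ st.2 →
    (ks.foldl (pvBStep L) st = st ∧ ∀ k ∈ ks, pvG L k ≤ st.2) ∨
    (∃ l₁ k l₂, ks = l₁ ++ k :: l₂ ∧ ks.foldl (pvBStep L) st = (some k, pvG L k) ∧
      st.2 < pvG L k ∧ (∀ k' ∈ l₁, pvG L k' < pvG L k) ∧ (∀ k' ∈ ks, pvG L k' ≤ pvG L k)) := by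
  induction ks with
  | nil => intro st _; left; simp
  | cons k rest ih =>
    intro st hst
    rw [List.foldl_cons, pv_step_eq L st k hst]
    by_cases hc : st.2 < pvG L k
    · rw [if_pos hc]
      have h2 : (-1 : Int) ≤ pvG L k := le_trans hst (le_of_lt hc)
      rcases ih (some k, pvG L k) h2 with ⟨h1, hall⟩ | ⟨l₁, k', l₂, he, hf, hlt, hfirst, hmax⟩
      · refine Or.inr ⟨[], k, rest, rfl, h1, hc, by simp, ?_⟩
        intro k' hk'
        rcases List.mem_cons.mp hk' with h | h
        · subst h; exact le_refl _
        · exact hall k' h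
      · refine Or.inr ⟨k :: l₁, k', l₂, by simp [he], hf, lt_trans hc hlt, ?_, ?_⟩
        · intro k'' hk''
          rcases List.mem_cons.mp hk'' with h | h
          · subst h; exact hlt
          · exact hfirst k'' h
        · intro k'' hk''
          rcases List.mem_cons.mp hk'' with h | h
          · subst h; exact le_of_lt hlt
          · exact hmax k'' (he ▸ h)
    · rw [if_neg hc]
      have hle : pvG L k ≤ st.2 := not_lt.mp hc
      rcases ih st hst with ⟨h1, hall⟩ | ⟨l₁, k', l₂, he, hf, hlt, hfirst, hmax⟩
      · refine Or.inl ⟨h1, ?_⟩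
        intro k' hk'
        rcases List.mem_cons.mp hk' with h | h
        · subst h; exact hle
        · exact hall k' h
      · refine Or.inr ⟨k :: l₁, k', l₂, by simp [he], hf, hlt, ?_, ?_⟩
        · intro k'' hk''
          rcases List.mem_cons.mp hk'' with h | h
          · subst h; exact lt_of_le_of_lt hle hlt
          · exact hfirst k'' h
        · intro k'' hk''
          rcases List.mem_cons.mp hk'' with h | h
          · subst h; exact le_trans hle (le_of_lt hlt)
          · exact hmax k'' (he ▸ h)

lemma pv_sec_eq (L : List Char) (i : Nat) :
    PySem.Chars.slice L none (some ((i : Nat) : Int)) = L.take i := by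
  simp [pysem]

lemma pv_find?_middle {α : Type} (p : α → Bool) (l₁ l₂ : List α) (a : α)
    (h1 : ∀ x ∈ l₁, p x = false) (ha : p a = true) :
    (l₁ ++ a :: l₂).find? p = some a := by
  induction l₁ with
  | nil => simp [ha]
  | cons x t ih =>
    have hx : p x = false := h1 x (List.mem_cons_self)
    simp only [List.cons_append, List.find?_cons, hx]
    exact ih (fun y hy => h1 y (List.mem_cons_of_mem x hy))

lemma pv_aLoop_none (numbers : List (String × String)) (L : List Char)
    (h : ∀ num ∈ PySem.Dict.keys (PySem.Dict.mk numbers),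
      PySem.Chars.rfind L num.toList = -1) :
    ∀ i, i ≤ L.length → pvALoop numbers L i = "" := by
  intro i
  induction i with
  | zero => intro _; rfl
  | succ i ih =>
    intro hi
    have hfind : (PySem.Dict.keys (PySem.Dict.mk numbers)).find?
        (fun num => PySem.Chars.endswith
          (PySem.Chars.slice L none (some ((i + 1 : Nat) : Int))) num.toList) = none := by
      rw [List.find?_eq_none]
      intro num hnum
      rw [pv_sec_eq]
      intro hend
      obtain ⟨p, _, hpre⟩ := (pv_endswith_take L num.toList (i + 1) hi).mp hend
      exact pv_rfind_neg (h num hnum) p hpre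
    rw [pvALoop, hfind]
    exact ih (by omega)

lemma pv_aLoop_match (numbers : List (String × String)) (L : List Char) (e : Nat) (k : String)
    (l₁ l₂ : List String)
    (hks : PySem.Dict.keys (PySem.Dict.mk numbers) = l₁ ++ k :: l₂)
    (he1 : 1 ≤ e) (hm : pvMatches L k e)
    (hmax : ∀ num ∈ PySem.Dict.keys (PySem.Dict.mk numbers), pvG L num ≤ (e : Int))
    (hfirst : ∀ num ∈ l₁, pvG L num < (e : Int)) :
    ∀ i, e ≤ i → i ≤ L.length →
      pvALoop numbers L i = PySem.Dict.getD (PySem.Dict.mk numbers) k "" := by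
  intro i
  induction i with
  | zero => intro h1 _; omega
  | succ i ih =>
    intro h1 h2
    by_cases hie : i + 1 = e
    · have hfind : (PySem.Dict.keys (PySem.Dict.mk numbers)).find?
          (fun num => PySem.Chars.endswith
            (PySem.Chars.slice L none (some ((i + 1 : Nat) : Int))) num.toList) = some k := by
        rw [hks]
        apply pv_find?_middle
        · intro num hnum
          rw [pv_sec_eq]
          by_contra hb
          have hend : PySem.Chars.endswith (L.take (i + 1)) num.toList = true := by
            simpa using hb
          obtain ⟨p, hpe, hpre⟩ := (pv_endswith_take L num.toList (i + 1) h2).mp hend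
          have hge : ((i + 1 : Nat) : Int) ≤ pvG L num :=
            pvG_ge_of_matches h2 ⟨p, hpe, hpre⟩
          have hlt : pvG L num < (e : Int) := hfirst num hnum
          omega
        · rw [pv_sec_eq]
          rw [pv_endswith_take L k.toList (i + 1) h2]
          rw [hie]
          exact hm
      rw [pvALoop, hfind]
    · have hfind : (PySem.Dict.keys (PySem.Dict.mk numbers)).find?
          (fun num => PySem.Chars.endswith
            (PySem.Chars.slice L none (some ((i + 1 : Nat) : Int))) num.toList) = none := by
        rw [List.find?_eq_none]
        intro num hnum
        rw [pv_sec_eq]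
        intro hend
        obtain ⟨p, hpe, hpre⟩ := (pv_endswith_take L num.toList (i + 1) h2).mp hend
        have hge : ((i + 1 : Nat) : Int) ≤ pvG L num :=
          pvG_ge_of_matches h2 ⟨p, hpe, hpre⟩
        have hle : pvG L num ≤ (e : Int) := hmax num hnum
        omega
      rw [pvALoop, hfind]
      exact ih (by omega) (by omega)

-- ===== VERDICT (by name: the statement is the Claim_ definition above) =====
theorem get_last_number_in_line_spec : Claim_equal_get_last_number_in_line := by
  intro numbers line _hdom hpre
  unfold Spec_get_last_number_in_line
  rw [get_last_number_in_line, get_last_number_in_line_alt]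
  by_cases hL : line.toList = []
  · -- empty line: A's loop never runs; B can only pick an empty key, whose value Pre_ makes ''
    have hline : line = "" := String.toList_eq_nil_iff.mp hL
    have hA : pvALoop numbers line.toList line.toList.length = "" := by
      rw [hL]; rfl
    rw [hA]
    have hgetD : PySem.Dict.getD (PySem.Dict.mk numbers) "" "" = "" := by
      rw [PySem.Dict.getD, PySem.Dict.get?]
      cases hf : numbers.find? (fun p => p.1 == "") with
      | none => rfl
      | some pr => simpa using hpre hline pr hf
    rcases pv_fold_spec line.toList (PySem.Dict.keys (PySem.Dict.mk numbers)) (none, -1)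
        (by norm_num) with ⟨hf, _⟩ | ⟨l₁, k, l₂, _, hf, hlt, _, _⟩
    · rw [hf]
    · rw [hf]
      have hk : k.toList = [] := by
        by_contra hk
        have hne : PySem.Chars.rfind line.toList k.toList = -1 := by
          by_contra hne
          obtain ⟨q, _, _, hqpre, _⟩ := pv_rfind_pos hne
          rw [hL, List.drop_nil] at hqpre
          exact hk (List.prefix_nil.mp hqpre)
        rw [pvG, if_pos hne] at hlt
        omega
      have hke : k = "" := String.toList_eq_nil_iff.mp hk
      subst hke
      simpa using hgetD.symm
  · rcases pv_fold_spec line.toList (PySem.Dict.keys (PySem.Dict.mk numbers)) (none, -1)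
        (by norm_num) with ⟨hf, hall⟩ | ⟨l₁, k, l₂, hks, hf, hlt, hfirst, hmax⟩
    · rw [hf]
      refine pv_aLoop_none numbers line.toList ?_ line.toList.length (Nat.le_refl _)
      intro num hnum
      by_contra hne
      obtain ⟨q, hq, _, _, _⟩ := pv_rfind_pos hne
      have := hall num hnum
      rw [pvG, if_neg hne, hq] at this
      have hq0 : (0 : Int) ≤ q := by positivity
      omega
    · rw [hf]
      have hne : PySem.Chars.rfind line.toList k.toList ≠ -1 := by
        intro h
        rw [pvG, if_pos h] at hlt
        omega
      obtain ⟨e, heg, helen, hm⟩ := pvG_matches hne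
      have hkks : k ∈ PySem.Dict.keys (PySem.Dict.mk numbers) := by
        rw [hks]; exact List.mem_append_right _ (List.mem_cons_self)
      have hdisj : line.toList ≠ [] ∨ k.toList ≠ [] := Or.inl hL
      have h1g : (1 : Int) ≤ pvG line.toList k := pvG_one_le hdisj hne
      have he1 : 1 ≤ e := by omega
      exact pv_aLoop_match numbers line.toList e k l₁ l₂ hks he1 hm
        (fun num hnum => heg ▸ hmax num hnum)
        (fun num hnum => heg ▸ hfirst num hnum)
        line.toList.length (by omega) (Nat.le_refl _)
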